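-- pv_equiv track=rewrite | github.com/idoerr/challenges | adventofcode2023/day10puz2solution.py | convert_map_to_space_matrix
-- ===== SOURCE A (Python) =====
-- def convert_map_to_space_matrix(map_matrix, travel_path):
--     space_matrix = []
--     for row_num, row in enumerate(map_matrix):
--         top_row = []
--         mid_row = []
--         bot_row = []
--
--         for col_num, x in enumerate(row):
--             if not ((row_num, col_num) in travel_path):
--                 top_row.extend([0, 0, 0])
--                 mid_row.extend([0, 0, 0])
--                 bot_row.extend([0, 0, 0])
--                 continue
--             match x:
--                 case 'S':
--                     top_row.extend([0, 1, 0])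
--                     mid_row.extend([1, 1, 1])
--                     bot_row.extend([0, 1, 0])
--                 case '|':
--                     top_row.extend([0, 1, 0])
--                     mid_row.extend([0, 1, 0])
--                     bot_row.extend([0, 1, 0])
--                 case '-':
--                     top_row.extend([0, 0, 0])
--                     mid_row.extend([1, 1, 1])
--                     bot_row.extend([0, 0, 0])
--                 case 'L':
--                     top_row.extend([0, 1, 0])
--                     mid_row.extend([0, 1, 1])
--                     bot_row.extend([0, 0, 0])
--                 case 'F':
--                     top_row.extend([0, 0, 0])
--                     mid_row.extend([0, 1, 1])
--                     bot_row.extend([0, 1, 0])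
--                 case 'J':
--                     top_row.extend([0, 1, 0])
--                     mid_row.extend([1, 1, 0])
--                     bot_row.extend([0, 0, 0])
--                 case '7':
--                     top_row.extend([0, 0, 0])
--                     mid_row.extend([1, 1, 0])
--                     bot_row.extend([0, 1, 0])
--                 case _:
--                     top_row.extend([0, 0, 0])
--                     mid_row.extend([0, 0, 0])
--                     bot_row.extend([0, 0, 0])
--
--         space_matrix.append(top_row)
--         space_matrix.append(mid_row)
--         space_matrix.append(bot_row)
--     return space_matrix
-- ===== SOURCE B (Python) =====
-- _BLOCKS = {
--     'S': [(0, 1), (1, 0), (1, 1), (1, 2), (2, 1)],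
--     '|': [(0, 1), (1, 1), (2, 1)],
--     '-': [(1, 0), (1, 1), (1, 2)],
--     'L': [(0, 1), (1, 1), (1, 2)],
--     'F': [(1, 1), (1, 2), (2, 1)],
--     'J': [(0, 1), (1, 0), (1, 1)],
--     '7': [(1, 0), (1, 1), (2, 1)],
-- }
--
-- def convert_map_to_space_matrix(map_matrix, travel_path):
--     space_matrix = []
--     for row in map_matrix:
--         n = 3 * len(row)
--         for _ in range(3):
--             space_matrix.append([0] * n)
--     for (r, c) in travel_path:
--         if 0 <= r < len(map_matrix) and 0 <= c < len(map_matrix[r]):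
--             ch = map_matrix[r][c]
--             if ch in _BLOCKS:
--                 for (dr, dc) in _BLOCKS[ch]:
--                     space_matrix[3 * r + dr][3 * c + dc] = 1
--     return space_matrix
-- ===== Notes on version B (the rewrite author's own statement) =====
-- stated objective: faster
-- what changed: Instead of scanning every grid cell and testing path membership per cell, B zero-initialises the 3x output and sparsely writes the 3x3 block pattern only for the cells listed in travel_path, using a char-to-offsets lookup table.
import Mathlib
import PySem

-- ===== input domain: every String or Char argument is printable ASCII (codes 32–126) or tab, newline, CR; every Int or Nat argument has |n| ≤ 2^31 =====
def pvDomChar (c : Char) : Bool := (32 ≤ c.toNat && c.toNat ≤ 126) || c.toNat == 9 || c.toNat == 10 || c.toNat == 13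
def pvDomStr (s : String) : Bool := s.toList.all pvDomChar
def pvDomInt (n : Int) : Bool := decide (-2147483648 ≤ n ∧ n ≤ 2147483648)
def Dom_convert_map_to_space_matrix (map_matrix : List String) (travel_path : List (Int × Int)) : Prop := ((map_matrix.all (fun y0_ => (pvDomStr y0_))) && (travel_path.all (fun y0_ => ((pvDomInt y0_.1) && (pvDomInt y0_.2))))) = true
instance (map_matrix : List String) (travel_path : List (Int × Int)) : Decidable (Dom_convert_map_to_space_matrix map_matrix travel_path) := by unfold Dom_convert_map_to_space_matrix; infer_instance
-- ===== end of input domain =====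

-- B replaces A's per-cell scan of travel_path (O(rows*cols*|path|)) by a zero-initialised
-- 3x matrix plus a sparse fill over travel_path via a char→offsets table (O(rows*cols+|path|)).

-- ===== PORT A =====
-- the three 3-cell lines (top, mid, bottom) A's match statement emits for a path cell
def pvBlock (x : Char) : List Int × List Int × List Int :=
  match x with
  | 'S' => ([0,1,0],[1,1,1],[0,1,0])
  | '|' => ([0,1,0],[0,1,0],[0,1,0])
  | '-' => ([0,0,0],[1,1,1],[0,0,0])
  | 'L' => ([0,1,0],[0,1,1],[0,0,0])
  | 'F' => ([0,0,0],[0,1,1],[0,1,0])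
  | 'J' => ([0,1,0],[1,1,0],[0,0,0])
  | '7' => ([0,0,0],[1,1,0],[0,1,0])
  | _   => ([0,0,0],[0,0,0],[0,0,0])

def convert_map_to_space_matrix (map_matrix : List String) (travel_path : List (Int × Int)) : List (List Int) :=
  (PySem.List.enumerate map_matrix 0).foldl
    (fun space_matrix rr =>
      let tmb := (PySem.List.enumerate rr.2.toList 0).foldl
        (fun (acc : List Int × List Int × List Int) cx =>
          if (rr.1, cx.1) ∈ travel_path then
            let b := pvBlock cx.2
            (acc.1 ++ b.1, acc.2.1 ++ b.2.1, acc.2.2 ++ b.2.2)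
          else
            (acc.1 ++ [0,0,0], acc.2.1 ++ [0,0,0], acc.2.2 ++ [0,0,0]))
        ([], [], [])
      space_matrix ++ [tmb.1, tmb.2.1, tmb.2.2])
    []

-- ===== PORT B =====
-- B's lookup dict: offsets (dr, dc) inside the 3×3 block that become 1
def pvBlocks? (ch : Char) : Option (List (Nat × Nat)) :=
  match ch with
  | 'S' => some [(0,1),(1,0),(1,1),(1,2),(2,1)]
  | '|' => some [(0,1),(1,1),(2,1)]
  | '-' => some [(1,0),(1,1),(1,2)]
  | 'L' => some [(0,1),(1,1),(1,2)]
  | 'F' => some [(1,1),(1,2),(2,1)]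
  | 'J' => some [(0,1),(1,0),(1,1)]
  | '7' => some [(1,0),(1,1),(2,1)]
  | _   => none

-- space_matrix[i][j] = 1 (in-bounds by B's guard, so List.set is exact here)
def pvSet1 (m : List (List Int)) (i j : Nat) : List (List Int) :=
  m.set i ((m.getD i []).set j 1)

def convert_map_to_space_matrix_alt (map_matrix : List String) (travel_path : List (Int × Int)) : List (List Int) :=
  let zero := map_matrix.foldl
    (fun acc s => acc ++ [List.replicate (3*s.toList.length) (0:Int),
                          List.replicate (3*s.toList.length) (0:Int),
                          List.replicate (3*s.toList.length) (0:Int)]) []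
  travel_path.foldl
    (fun sp rc =>
      if (0:Int) ≤ rc.1 ∧ rc.1 < (map_matrix.length : Int) ∧ (0:Int) ≤ rc.2 ∧ rc.2 < ((map_matrix.getD rc.1.toNat "").toList.length : Int) then
        match pvBlocks? ((map_matrix.getD rc.1.toNat "").toList.getD rc.2.toNat ' ') with
        | some offs =>
            offs.foldl (fun sp de => pvSet1 sp (3*rc.1.toNat + de.1) (3*rc.2.toNat + de.2)) sp
        | none => sp
      else sp)
    zero

-- ===== PRECONDITION & SPEC =====
def Spec_convert_map_to_space_matrix (map_matrix : List String) (travel_path : List (Int × Int)) (out : List (List Int)) : Prop := out = convert_map_to_space_matrix_alt map_matrix travel_path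
instance (map_matrix : List String) (travel_path : List (Int × Int)) (out : List (List Int)) : Decidable (Spec_convert_map_to_space_matrix map_matrix travel_path out) := by unfold Spec_convert_map_to_space_matrix; infer_instance

-- ===== CLAIM (what is proved, stated in full; the proofs are below) =====
def Claim_equal_convert_map_to_space_matrix : Prop := ∀ (map_matrix : List String) (travel_path : List (Int × Int)), Dom_convert_map_to_space_matrix map_matrix travel_path → Spec_convert_map_to_space_matrix map_matrix travel_path (convert_map_to_space_matrix map_matrix travel_path)

-- ===== LEMMAS AND PROOFS =====

-- entry access with default 0 / default row []
def pvE (m : List (List Int)) (i j : Nat) : Int := (m.getD i []).getD j 0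

-- component picker for the (top, mid, bot) triple
def pvPick (s : Nat) (t : List Int × List Int × List Int) : List Int :=
  match s with | 0 => t.1 | 1 => t.2.1 | _ => t.2.2

-- the triple of 3-cell lines A emits for column cx of row rn
def pvLine (travel_path : List (Int × Int)) (rn : Int) (cx : Int × Char) : List Int × List Int × List Int :=
  if (rn, cx.1) ∈ travel_path then pvBlock cx.2 else ([0,0,0],[0,0,0],[0,0,0])

-- "(s,e) is a set offset of ch's block" (B's table, as a Bool test)
def pvHasOff (ch : Char) (s e : Nat) : Bool :=
  match pvBlocks? ch with | some o => o.contains (s, e) | none => false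

lemma pvBlock_len (x : Char) (s : Nat) : (pvPick s (pvBlock x)).length = 3 := by
  unfold pvBlock; split <;> (unfold pvPick; split <;> rfl)

lemma pvBlocks?_lt (ch : Char) (o : List (Nat × Nat)) (h : pvBlocks? ch = some o)
    (de : Nat × Nat) (hm : de ∈ o) : de.1 < 3 ∧ de.2 < 3 := by
  unfold pvBlocks? at h
  split at h <;>
    try (injection h with h; subst h; fin_cases hm <;> exact ⟨by omega, by omega⟩)
  simp at h

-- the bit A writes at line s, offset e equals B's membership test
lemma pvBlockBit (ch : Char) (s e : Nat) (hs : s < 3) (he : e < 3) :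
    (pvPick s (pvBlock ch)).getD e 0 = if pvHasOff ch s e then 1 else 0 := by
  unfold pvHasOff pvBlock pvBlocks?
  split <;>
    (interval_cases s <;> interval_cases e <;> simp [pvPick, List.getD, Prod.ext_iff])

-- row extensionality via getD
lemma pvExtRow (a b : List Int) (hl : a.length = b.length)
    (h : ∀ j, a.getD j 0 = b.getD j 0) : a = b := by
  induction a generalizing b with
  | nil => cases b <;> simp_all
  | cons x xs ih =>
    cases b with
    | nil => simp_all
    | cons y ys =>
      have h0 := h 0
      simp [List.getD] at h0 hl ⊢
      exact ⟨h0, ih ys hl fun j => by simpa [List.getD] using h (j+1)⟩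

lemma pvExt (a b : List (List Int)) (hl : a.map List.length = b.map List.length)
    (h : ∀ i j, pvE a i j = pvE b i j) : a = b := by
  induction a generalizing b with
  | nil => cases b <;> simp_all
  | cons x xs ih =>
    cases b with
    | nil => simp_all
    | cons y ys =>
      simp at hl
      refine List.cons_eq_cons.mpr ⟨pvExtRow x y hl.1 fun j => by simpa [pvE, List.getD] using h 0 j,
        ih ys hl.2 fun i j => by simpa [pvE, List.getD] using h (i+1) j⟩

lemma pvLenFlatMap3 {α β : Type} (l : List α) (F : α → List β) (h : ∀ x ∈ l, (F x).length = 3) :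
    (l.flatMap F).length = 3 * l.length := by
  induction l with
  | nil => simp
  | cons x xs ih => simp [List.flatMap_cons, h x (by simp), ih fun y hy => h y (by simp [hy])]; ring

-- getD of a flatMap with uniform chunk length 3, at index 3*q+s, s<3
lemma pvGetDFlatMap3 {α β : Type} (l : List α) (F : α → List β) (d : β) (a0 : α)
    (h : ∀ x ∈ l, (F x).length = 3) (q s : Nat) (hs : s < 3) :
    (l.flatMap F).getD (3*q+s) d = if q < l.length then (F (l.getD q a0)).getD s d else d := by
  induction l generalizing q with
  | nil => simp
  | cons x xs ih =>
    have hx : (F x).length = 3 := h x (by simp)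
    rcases Nat.eq_zero_or_pos q with hq | hq
    · subst hq
      simp only [List.flatMap_cons]
      rw [show 3*0+s = s by omega]
      simp [List.getD, List.getElem?_append, hx.symm ▸ hs, hs]
    · obtain ⟨q', rfl⟩ : ∃ q', q = q' + 1 := ⟨q - 1, by omega⟩
      have := ih (fun y hy => h y (by simp [hy])) q'
      simp only [List.flatMap_cons, List.getD, List.getElem?_append_right (by omega : (F x).length ≤ 3*(q'+1)+s)]
      rw [show 3*(q'+1)+s - (F x).length = 3*q'+s by omega]
      simpa [List.getD] using this

lemma pvRowlen_of_shape_eq (a b : List (List Int)) (h : a.map List.length = b.map List.length)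
    (i : Nat) : (a.getD i []).length = (b.getD i []).length := by
  have : (a.map List.length)[i]? = (b.map List.length)[i]? := by rw [h]
  simp only [List.getElem?_map] at this
  simp only [List.getD]
  cases ha : a[i]? <;> cases hb : b[i]? <;> simp_all

lemma pvSet1_shape (m : List (List Int)) (i j : Nat) :
    (pvSet1 m i j).map List.length = m.map List.length := by
  unfold pvSet1
  by_cases hi : i < m.length
  · rw [List.map_set]
    have hv : ((m.getD i []).set j 1).length = m[i].length := by
      simp [List.getD, List.getElem?_eq_getElem hi]
    rw [hv, show m[i].length = (m.map List.length)[i]'(by simpa using hi) by simp,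
       List.set_getElem_self]
  · rw [List.set_eq_of_length_le (by omega)]

lemma pvE_set1 (m : List (List Int)) (i j i' j' : Nat) :
    pvE (pvSet1 m i j) i' j' =
      if i' = i ∧ j' = j ∧ i < m.length ∧ j < (m.getD i []).length then 1 else pvE m i' j' := by
  unfold pvE pvSet1
  by_cases hi : i < m.length
  · by_cases hii : i' = i
    · subst hii
      have hrow : (m.set i' ((m.getD i' []).set j 1)).getD i' [] = (m.getD i' []).set j 1 := by
        simp [List.getD, List.getElem?_set_self, hi]
      rw [hrow]
      by_cases hj : j < (m.getD i' []).length
      · by_cases hjj : j' = j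
        · subst hjj
          have hj' : j' < m[i'].length := by
            simpa [List.getD, List.getElem?_eq_getElem hi] using hj
          simp [hi, hj, List.getD, List.getElem?_eq_getElem hi, hj']
        · simp only [List.getD, List.getElem?_set_ne (fun h => hjj h.symm)]
          simp [hi, hj, hjj]
      · rw [List.set_eq_of_length_le (by omega), if_neg (fun h => hj h.2.2.2)]
    · have : (m.set i ((m.getD i []).set j 1)).getD i' [] = m.getD i' [] := by
        simp [List.getD, List.getElem?_set_ne (fun h => hii h.symm)]
      rw [this]; simp [hii]
  · rw [List.set_eq_of_length_le (by omega)]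
    simp [hi]

-- inner fold of B over the offsets list
lemma pvFoldOffs (offs : List (Nat × Nat)) (r c : Nat) (M : List (List Int)) :
    ((offs.foldl (fun sp de => pvSet1 sp (3*r + de.1) (3*c + de.2)) M).map List.length
        = M.map List.length) ∧
    ∀ i j, pvE (offs.foldl (fun sp de => pvSet1 sp (3*r + de.1) (3*c + de.2)) M) i j =
      if (∃ de ∈ offs, i = 3*r + de.1 ∧ j = 3*c + de.2 ∧ 3*r + de.1 < M.length ∧
            3*c + de.2 < (M.getD (3*r + de.1) []).length) then 1 else pvE M i j := by
  induction offs generalizing M with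
  | nil => simp
  | cons de rest ih =>
    obtain ⟨ihs, ihe⟩ := ih (pvSet1 M (3*r + de.1) (3*c + de.2))
    have hshape : (pvSet1 M (3*r + de.1) (3*c + de.2)).map List.length = M.map List.length :=
      pvSet1_shape _ _ _
    have hlen : (pvSet1 M (3*r + de.1) (3*c + de.2)).length = M.length := by
      have := congrArg List.length hshape; simpa using this
    constructor
    · rw [List.foldl_cons, ihs, hshape]
    · intro i j
      rw [List.foldl_cons, ihe i j, pvE_set1]
      have hrl : ∀ k, ((pvSet1 M (3*r + de.1) (3*c + de.2)).getD k []).length = (M.getD k []).length :=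
        fun k => pvRowlen_of_shape_eq _ _ hshape k
      simp only [hlen, hrl]
      by_cases hRest : ∃ d' ∈ rest, i = 3*r + d'.1 ∧ j = 3*c + d'.2 ∧ 3*r + d'.1 < M.length ∧
          3*c + d'.2 < (M.getD (3*r + d'.1) []).length
      · obtain ⟨d', hd', hA⟩ := hRest
        rw [if_pos ⟨d', hd', hA⟩, if_pos ⟨d', List.mem_cons_of_mem _ hd', hA⟩]
      · rw [if_neg hRest]
        by_cases hDe : i = 3*r + de.1 ∧ j = 3*c + de.2 ∧ 3*r + de.1 < M.length ∧
            3*c + de.2 < (M.getD (3*r + de.1) []).length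
        · rw [if_pos hDe, if_pos ⟨de, List.mem_cons_self, hDe⟩]
        · rw [if_neg hDe, if_neg]
          rintro ⟨d', hd', hA⟩
          rcases List.mem_cons.mp hd' with rfl | hd'
          · exact hDe hA
          · exact hRest ⟨d', hd', hA⟩

-- per-path-element write condition of B (bounds written w.r.t. matrix M)
def pvHitM (map_matrix : List String) (M : List (List Int)) (rc : Int × Int) (i j : Nat) : Prop :=
  ((0:Int) ≤ rc.1 ∧ rc.1 < (map_matrix.length : Int) ∧ (0:Int) ≤ rc.2 ∧
    rc.2 < (((map_matrix.getD rc.1.toNat "").toList.length : Int))) ∧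
  ∃ o, pvBlocks? ((map_matrix.getD rc.1.toNat "").toList.getD rc.2.toNat ' ') = some o ∧
    ∃ de ∈ o, i = 3*rc.1.toNat + de.1 ∧ j = 3*rc.2.toNat + de.2 ∧
      3*rc.1.toNat + de.1 < M.length ∧ 3*rc.2.toNat + de.2 < (M.getD (3*rc.1.toNat + de.1) []).length

lemma pvHitM_congr (map_matrix : List String) (M M' : List (List Int))
    (h : M'.map List.length = M.map List.length) (rc : Int × Int) (i j : Nat) :
    pvHitM map_matrix M' rc i j ↔ pvHitM map_matrix M rc i j := by
  have hlen : M'.length = M.length := by have := congrArg List.length h; simpa using this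
  have hrl := pvRowlen_of_shape_eq _ _ h
  unfold pvHitM
  rw [hlen]
  constructor <;> rintro ⟨hg, o, ho, de, hde, h1, h2, h3, h4⟩ <;>
    exact ⟨hg, o, ho, de, hde, h1, h2, h3, by rw [hrl] at * ; assumption⟩

-- outer fold of B over the path
lemma pvFoldPath (map_matrix : List String) (p : List (Int × Int)) (M : List (List Int)) :
    ((p.foldl (fun sp rc =>
      if (0:Int) ≤ rc.1 ∧ rc.1 < (map_matrix.length : Int) ∧ (0:Int) ≤ rc.2 ∧ rc.2 < ((map_matrix.getD rc.1.toNat "").toList.length : Int) then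
        match pvBlocks? ((map_matrix.getD rc.1.toNat "").toList.getD rc.2.toNat ' ') with
        | some offs =>
            offs.foldl (fun sp de => pvSet1 sp (3*rc.1.toNat + de.1) (3*rc.2.toNat + de.2)) sp
        | none => sp
      else sp) M).map List.length = M.map List.length) ∧
    (∀ i j, (∃ rc ∈ p, pvHitM map_matrix M rc i j) → pvE (p.foldl (fun sp rc =>
      if (0:Int) ≤ rc.1 ∧ rc.1 < (map_matrix.length : Int) ∧ (0:Int) ≤ rc.2 ∧ rc.2 < ((map_matrix.getD rc.1.toNat "").toList.length : Int) then
        match pvBlocks? ((map_matrix.getD rc.1.toNat "").toList.getD rc.2.toNat ' ') with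
        | some offs =>
            offs.foldl (fun sp de => pvSet1 sp (3*rc.1.toNat + de.1) (3*rc.2.toNat + de.2)) sp
        | none => sp
      else sp) M) i j = 1) ∧
    (∀ i j, (¬ ∃ rc ∈ p, pvHitM map_matrix M rc i j) → pvE (p.foldl (fun sp rc =>
      if (0:Int) ≤ rc.1 ∧ rc.1 < (map_matrix.length : Int) ∧ (0:Int) ≤ rc.2 ∧ rc.2 < ((map_matrix.getD rc.1.toNat "").toList.length : Int) then
        match pvBlocks? ((map_matrix.getD rc.1.toNat "").toList.getD rc.2.toNat ' ') with
        | some offs =>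
            offs.foldl (fun sp de => pvSet1 sp (3*rc.1.toNat + de.1) (3*rc.2.toNat + de.2)) sp
        | none => sp
      else sp) M) i j = pvE M i j) := by
  induction p generalizing M with
  | nil => simp
  | cons rc p ih =>
    by_cases hg : (0:Int) ≤ rc.1 ∧ rc.1 < (map_matrix.length : Int) ∧ (0:Int) ≤ rc.2 ∧
        rc.2 < ((map_matrix.getD rc.1.toNat "").toList.length : Int)
    · cases hb : pvBlocks? ((map_matrix.getD rc.1.toNat "").toList.getD rc.2.toNat ' ') with
      | none =>
        have hstep : ∀ M0 : List (List Int), (if (0:Int) ≤ rc.1 ∧ rc.1 < (map_matrix.length : Int) ∧ (0:Int) ≤ rc.2 ∧ rc.2 < ((map_matrix.getD rc.1.toNat "").toList.length : Int) then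
            match pvBlocks? ((map_matrix.getD rc.1.toNat "").toList.getD rc.2.toNat ' ') with
            | some offs =>
                offs.foldl (fun sp de => pvSet1 sp (3*rc.1.toNat + de.1) (3*rc.2.toNat + de.2)) M0
            | none => M0
          else M0) = M0 := fun M0 => by rw [if_pos hg, hb]
        have hnohit : ∀ i j, ¬ pvHitM map_matrix M rc i j := by
          rintro i j ⟨-, o, ho, -⟩; rw [hb] at ho; simp at ho
        obtain ⟨ihs, ih1, ih2⟩ := ih M
        refine ⟨by rw [List.foldl_cons, hstep]; exact ihs, ?_, ?_⟩
        · intro i j hh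
          rw [List.foldl_cons, hstep]
          obtain ⟨rc', hm, hh⟩ := hh
          rcases List.mem_cons.mp hm with rfl | hm
          · exact absurd hh (hnohit i j)
          · exact ih1 i j ⟨rc', hm, hh⟩
        · intro i j hh
          rw [List.foldl_cons, hstep]
          exact ih2 i j (fun ⟨rc', hm, hh'⟩ => hh ⟨rc', List.mem_cons_of_mem _ hm, hh'⟩)
      | some o =>
        have hstep : (if (0:Int) ≤ rc.1 ∧ rc.1 < (map_matrix.length : Int) ∧ (0:Int) ≤ rc.2 ∧ rc.2 < ((map_matrix.getD rc.1.toNat "").toList.length : Int) then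
            match pvBlocks? ((map_matrix.getD rc.1.toNat "").toList.getD rc.2.toNat ' ') with
            | some offs =>
                offs.foldl (fun sp de => pvSet1 sp (3*rc.1.toNat + de.1) (3*rc.2.toNat + de.2)) M
            | none => M
          else M) = o.foldl (fun sp de => pvSet1 sp (3*rc.1.toNat + de.1) (3*rc.2.toNat + de.2)) M := by
          rw [if_pos hg, hb]
        obtain ⟨hOs, hOe⟩ := pvFoldOffs o rc.1.toNat rc.2.toNat M
        obtain ⟨ihs, ih1, ih2⟩ := ih (o.foldl (fun sp de => pvSet1 sp (3*rc.1.toNat + de.1) (3*rc.2.toNat + de.2)) M)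
        have hcg := pvHitM_congr map_matrix M
          (o.foldl (fun sp de => pvSet1 sp (3*rc.1.toNat + de.1) (3*rc.2.toNat + de.2)) M) hOs
        refine ⟨by rw [List.foldl_cons, hstep, ihs, hOs], ?_, ?_⟩
        · intro i j hh
          rw [List.foldl_cons, hstep]
          by_cases hp : ∃ rc' ∈ p, pvHitM map_matrix M rc' i j
          · obtain ⟨rc', hm, hh'⟩ := hp
            exact ih1 i j ⟨rc', hm, (hcg rc' i j).mpr hh'⟩
          · obtain ⟨rc', hm, hh'⟩ := hh
            rcases List.mem_cons.mp hm with rfl | hm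
            · rw [ih2 i j (fun ⟨rc'', hm', hh''⟩ => hp ⟨rc'', hm', (hcg rc'' i j).mp hh''⟩),
                hOe i j]
              obtain ⟨-, o', ho', de, hde, h1, h2, h3, h4⟩ := hh'
              rw [hb] at ho'
              injection ho' with ho'; subst ho'
              rw [if_pos ⟨de, hde, h1, h2, h3, h4⟩]
            · exact absurd ⟨rc', hm, hh'⟩ hp
        · intro i j hh
          rw [List.foldl_cons, hstep,
            ih2 i j (fun ⟨rc'', hm', hh''⟩ =>
              hh ⟨rc'', List.mem_cons_of_mem _ hm', (hcg rc'' i j).mp hh''⟩),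
            hOe i j, if_neg]
          rintro ⟨de, hde, h1, h2, h3, h4⟩
          exact hh ⟨rc, List.mem_cons_self, hg, o, hb, de, hde, h1, h2, h3, h4⟩
    · have hstep : ∀ M0 : List (List Int), (if (0:Int) ≤ rc.1 ∧ rc.1 < (map_matrix.length : Int) ∧ (0:Int) ≤ rc.2 ∧ rc.2 < ((map_matrix.getD rc.1.toNat "").toList.length : Int) then
          match pvBlocks? ((map_matrix.getD rc.1.toNat "").toList.getD rc.2.toNat ' ') with
          | some offs =>
              offs.foldl (fun sp de => pvSet1 sp (3*rc.1.toNat + de.1) (3*rc.2.toNat + de.2)) M0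
          | none => M0
        else M0) = M0 := fun M0 => by rw [if_neg hg]
      have hnohit : ∀ i j, ¬ pvHitM map_matrix M rc i j := fun i j h => hg h.1
      obtain ⟨ihs, ih1, ih2⟩ := ih M
      refine ⟨by rw [List.foldl_cons, hstep]; exact ihs, ?_, ?_⟩
      · intro i j hh
        rw [List.foldl_cons, hstep]
        obtain ⟨rc', hm, hh⟩ := hh
        rcases List.mem_cons.mp hm with rfl | hm
        · exact absurd hh (hnohit i j)
        · exact ih1 i j ⟨rc', hm, hh⟩
      · intro i j hh
        rw [List.foldl_cons, hstep]
        exact ih2 i j (fun ⟨rc', hm, hh'⟩ => hh ⟨rc', List.mem_cons_of_mem _ hm, hh'⟩)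

-- A's per-row output, componentwise (top, mid, bot) over the enumerated characters
def pvRowF (path : List (Int × Int)) (rn : Int) (l : List (Int × Char)) :
    List Int × List Int × List Int :=
  (l.flatMap (fun cx => (pvLine path rn cx).1),
   l.flatMap (fun cx => (pvLine path rn cx).2.1),
   l.flatMap (fun cx => (pvLine path rn cx).2.2))

lemma pvLine_len (path : List (Int × Int)) (rn : Int) (cx : Int × Char) (s : Nat) :
    (pvPick s (pvLine path rn cx)).length = 3 := by
  unfold pvLine
  split
  · exact pvBlock_len _ _
  · unfold pvPick; split <;> rfl

lemma pvGetD3 (t : List Int × List Int × List Int) (s : Nat) (hs : s < 3) :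
    ([t.1, t.2.1, t.2.2]).getD s [] = pvPick s t := by
  interval_cases s <;> rfl

lemma pvPickRowF (path : List (Int × Int)) (rn : Int) (l : List (Int × Char)) (s : Nat)
    (hs : s < 3) :
    pvPick s (pvRowF path rn l) = l.flatMap (fun cx => pvPick s (pvLine path rn cx)) := by
  interval_cases s <;> rfl

lemma pvZeroPick (s e : Nat) :
    (pvPick s (([0,0,0] : List Int), ([0,0,0] : List Int), ([0,0,0] : List Int))).getD e 0 = 0 := by
  unfold pvPick; split <;> (rcases e with _ | _ | _ | e <;> rfl)

lemma pvEnumGetD {α : Type} (xs : List α) (q : Nat) (hq : q < xs.length) (a0 : Int × α) :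
    (PySem.List.enumerate xs 0).getD q a0 = ((q : Int), xs[q]) := by
  simp [List.getD, PySem.List.getElem?_enumerate, List.getElem?_eq_getElem hq]

lemma pvEnumFlatMap {α β : Type} (G : α → List β) (l : List α) :
    ∀ (k : Int), (PySem.List.enumerate l k).flatMap (fun rr => G rr.2) = l.flatMap G := by
  induction l with
  | nil => intro k; simp [PySem.List.enumerate_nil]
  | cons x xs ih => intro k; simp [PySem.List.enumerate_cons, ih (k+1)]

-- A's inner loop over the enumerated characters of one row
lemma pvInner (path : List (Int × Int)) (rn : Int) (l : List (Int × Char)) :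
    ∀ (t m b : List Int),
    l.foldl (fun (acc : List Int × List Int × List Int) cx =>
        if (rn, cx.1) ∈ path then
          (acc.1 ++ (pvBlock cx.2).1, acc.2.1 ++ (pvBlock cx.2).2.1, acc.2.2 ++ (pvBlock cx.2).2.2)
        else
          (acc.1 ++ [0,0,0], acc.2.1 ++ [0,0,0], acc.2.2 ++ [0,0,0])) (t, m, b)
      = (t ++ (pvRowF path rn l).1, m ++ (pvRowF path rn l).2.1, b ++ (pvRowF path rn l).2.2) := by
  induction l with
  | nil => intro t m b; simp [pvRowF]
  | cons cx l ih =>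
    intro t m b
    rw [List.foldl_cons]
    by_cases hm : (rn, cx.1) ∈ path
    · rw [if_pos hm, ih]
      simp [pvRowF, pvLine, hm, List.append_assoc]
    · rw [if_neg hm, ih]
      simp [pvRowF, pvLine, hm, List.append_assoc]

-- A's outer loop, as a flatMap over the enumerated rows
lemma pvAeq (path : List (Int × Int)) (L : List (Int × String)) :
    ∀ (acc : List (List Int)),
    L.foldl (fun space_matrix rr =>
      space_matrix ++
        [((PySem.List.enumerate rr.2.toList 0).foldl
            (fun (acc : List Int × List Int × List Int) cx =>
              if (rr.1, cx.1) ∈ path then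
                (acc.1 ++ (pvBlock cx.2).1, acc.2.1 ++ (pvBlock cx.2).2.1, acc.2.2 ++ (pvBlock cx.2).2.2)
              else
                (acc.1 ++ [0,0,0], acc.2.1 ++ [0,0,0], acc.2.2 ++ [0,0,0])) ([], [], [])).1,
         ((PySem.List.enumerate rr.2.toList 0).foldl
            (fun (acc : List Int × List Int × List Int) cx =>
              if (rr.1, cx.1) ∈ path then
                (acc.1 ++ (pvBlock cx.2).1, acc.2.1 ++ (pvBlock cx.2).2.1, acc.2.2 ++ (pvBlock cx.2).2.2)
              else
                (acc.1 ++ [0,0,0], acc.2.1 ++ [0,0,0], acc.2.2 ++ [0,0,0])) ([], [], [])).2.1,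
         ((PySem.List.enumerate rr.2.toList 0).foldl
            (fun (acc : List Int × List Int × List Int) cx =>
              if (rr.1, cx.1) ∈ path then
                (acc.1 ++ (pvBlock cx.2).1, acc.2.1 ++ (pvBlock cx.2).2.1, acc.2.2 ++ (pvBlock cx.2).2.2)
              else
                (acc.1 ++ [0,0,0], acc.2.1 ++ [0,0,0], acc.2.2 ++ [0,0,0])) ([], [], [])).2.2]) acc
    = acc ++ L.flatMap (fun rr =>
        [(pvRowF path rr.1 (PySem.List.enumerate rr.2.toList 0)).1,
         (pvRowF path rr.1 (PySem.List.enumerate rr.2.toList 0)).2.1,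
         (pvRowF path rr.1 (PySem.List.enumerate rr.2.toList 0)).2.2]) := by
  induction L with
  | nil => intro acc; simp
  | cons rr L ih =>
    intro acc
    rw [List.foldl_cons, pvInner, ih]
    simp [List.append_assoc]

-- the zero-initialised 3x matrix of B, as a flatMap
def pvZero (map_matrix : List String) : List (List Int) :=
  map_matrix.flatMap (fun s =>
    [List.replicate (3*s.toList.length) (0:Int),
     List.replicate (3*s.toList.length) (0:Int),
     List.replicate (3*s.toList.length) (0:Int)])

lemma pvZeroLen (map_matrix : List String) : (pvZero map_matrix).length = 3 * map_matrix.length :=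
  pvLenFlatMap3 _ _ (fun _ _ => rfl)

lemma pvZeroGet (map_matrix : List String) (q s : Nat) (hs : s < 3) (hq : q < map_matrix.length) :
    (pvZero map_matrix).getD (3*q+s) [] =
      List.replicate (3*(map_matrix.getD q "").toList.length) (0:Int) := by
  unfold pvZero
  rw [pvGetDFlatMap3 _ _ [] "" (fun _ _ => rfl) q s hs, if_pos hq]
  interval_cases s <;> rfl

lemma pvZeroE (map_matrix : List String) (i j : Nat) : pvE (pvZero map_matrix) i j = 0 := by
  obtain ⟨q, s, hs, rfl⟩ : ∃ q s, s < 3 ∧ i = 3*q+s := ⟨i/3, i%3, by omega, by omega⟩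
  unfold pvE
  by_cases hq : q < map_matrix.length
  · rw [pvZeroGet _ q s hs hq]
    simp [List.getD, List.getElem?_replicate]
    split <;> rfl
  · unfold pvZero
    rw [pvGetDFlatMap3 _ _ [] "" (fun _ _ => rfl) q s hs, if_neg hq]
    rfl

-- A's entry value, in closed form
lemma pvAE (map_matrix : List String) (path : List (Int × Int)) (i j : Nat) :
    pvE ((PySem.List.enumerate map_matrix 0).flatMap (fun rr =>
        [(pvRowF path rr.1 (PySem.List.enumerate rr.2.toList 0)).1,
         (pvRowF path rr.1 (PySem.List.enumerate rr.2.toList 0)).2.1,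
         (pvRowF path rr.1 (PySem.List.enumerate rr.2.toList 0)).2.2])) i j
    = if i/3 < map_matrix.length ∧ j/3 < (map_matrix.getD (i/3) "").toList.length ∧
          ((↑(i/3) : Int), (↑(j/3) : Int)) ∈ path ∧
          pvHasOff ((map_matrix.getD (i/3) "").toList.getD (j/3) ' ') (i%3) (j%3) = true
      then 1 else 0 := by
  obtain ⟨q, s, hs, rfl⟩ : ∃ q s, s < 3 ∧ i = 3*q+s := ⟨i/3, i%3, by omega, by omega⟩
  obtain ⟨c, e, he, rfl⟩ : ∃ c e, e < 3 ∧ j = 3*c+e := ⟨j/3, j%3, by omega, by omega⟩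
  have hq3 : (3*q+s)/3 = q := by omega
  have hs3 : (3*q+s)%3 = s := by omega
  have hc3 : (3*c+e)/3 = c := by omega
  have he3 : (3*c+e)%3 = e := by omega
  rw [hq3, hs3, hc3, he3]
  unfold pvE
  rw [pvGetDFlatMap3 _ _ [] ((0:Int), "") (fun _ _ => rfl) q s hs,
    PySem.List.length_enumerate]
  by_cases hq : q < map_matrix.length
  · have hgd : map_matrix.getD q "" = map_matrix[q] := by
      simp [List.getD, List.getElem?_eq_getElem hq]
    rw [if_pos hq, pvEnumGetD map_matrix q hq]
    rw [show ([(pvRowF path ((q:Int), map_matrix[q]).1 (PySem.List.enumerate ((q:Int), map_matrix[q]).2.toList 0)).1,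
         (pvRowF path ((q:Int), map_matrix[q]).1 (PySem.List.enumerate ((q:Int), map_matrix[q]).2.toList 0)).2.1,
         (pvRowF path ((q:Int), map_matrix[q]).1 (PySem.List.enumerate ((q:Int), map_matrix[q]).2.toList 0)).2.2] : List (List Int))
       = [(pvRowF path (q:Int) (PySem.List.enumerate map_matrix[q].toList 0)).1,
          (pvRowF path (q:Int) (PySem.List.enumerate map_matrix[q].toList 0)).2.1,
          (pvRowF path (q:Int) (PySem.List.enumerate map_matrix[q].toList 0)).2.2] from rfl]
    rw [pvGetD3 _ s hs, pvPickRowF _ _ _ s hs]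
    rw [pvGetDFlatMap3 _ _ 0 ((0:Int), ' ') (fun cx _ => pvLine_len path (q:Int) cx s) c e he,
      PySem.List.length_enumerate]
    by_cases hc : c < map_matrix[q].toList.length
    · rw [if_pos hc, pvEnumGetD _ c hc]
      unfold pvLine
      by_cases hmem : ((q:Int), (c:Int)) ∈ path
      · rw [if_pos hmem, pvBlockBit _ _ _ hs he]
        have hgd2 : map_matrix[q].toList.getD c ' ' = map_matrix[q].toList[c] := by
          simp [List.getD, List.getElem?_eq_getElem hc]
        rw [hgd, hgd2]
        have hc2 : c < map_matrix[q].length := by rw [← String.length_toList]; exact hc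
        simp [hq, hc, hc2, hmem]
      · rw [if_neg hmem, pvZeroPick s e, if_neg]
        rintro ⟨-, -, hmem', -⟩
        exact hmem hmem'
    · rw [if_neg hc, if_neg]
      rintro ⟨-, hc', -⟩
      rw [hgd] at hc'
      exact hc hc'
  · rw [if_neg hq, if_neg]
    · rfl
    · rintro ⟨hq', -⟩
      exact hq hq'

-- B hits the zero matrix at (i,j) exactly when A's condition at (i,j) holds
lemma pvKey (map_matrix : List String) (path : List (Int × Int)) (i j : Nat) :
    (∃ rc ∈ path, pvHitM map_matrix (pvZero map_matrix) rc i j) ↔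
    (i/3 < map_matrix.length ∧ j/3 < (map_matrix.getD (i/3) "").toList.length ∧
      ((↑(i/3) : Int), (↑(j/3) : Int)) ∈ path ∧
      pvHasOff ((map_matrix.getD (i/3) "").toList.getD (j/3) ' ') (i%3) (j%3) = true) := by
  obtain ⟨q, s, hs, rfl⟩ : ∃ q s, s < 3 ∧ i = 3*q+s := ⟨i/3, i%3, by omega, by omega⟩
  obtain ⟨c, e, he, rfl⟩ : ∃ c e, e < 3 ∧ j = 3*c+e := ⟨j/3, j%3, by omega, by omega⟩
  have hq3 : (3*q+s)/3 = q := by omega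
  have hs3 : (3*q+s)%3 = s := by omega
  have hc3 : (3*c+e)/3 = c := by omega
  have he3 : (3*c+e)%3 = e := by omega
  rw [hq3, hs3, hc3, he3]
  constructor
  · rintro ⟨rc, hmemrc, ⟨h1, h2, h3, h4⟩, o, ho, de, hde, hi, hj, hbi, hbj⟩
    obtain ⟨hd1, hd2⟩ := pvBlocks?_lt _ o ho de hde
    have hr : rc.1.toNat = q := by omega
    have hcn : rc.2.toNat = c := by omega
    have hde1 : de.1 = s := by omega
    have hde2 : de.2 = e := by omega
    have hrq : rc.1 = (q : Int) := by omega
    have hrc : rc.2 = (c : Int) := by omega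
    rw [hr] at h4 ho
    rw [hcn] at ho
    refine ⟨by omega, by omega, ?_, ?_⟩
    · have hpe : ((q : Int), (c : Int)) = rc := Prod.ext hrq.symm hrc.symm
      exact hpe ▸ hmemrc
    · unfold pvHasOff
      rw [ho]
      have : (s, e) ∈ o := by rw [← hde1, ← hde2]; exact hde
      simpa using this
  · rintro ⟨hq, hc, hmem, hoff⟩
    unfold pvHasOff at hoff
    rcases hb : pvBlocks? ((map_matrix.getD q "").toList.getD c ' ') with _ | o
    · rw [hb] at hoff; simp at hoff
    · rw [hb] at hoff
      have hmo : (s, e) ∈ o := by simpa using hoff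
      refine ⟨((q : Int), (c : Int)), hmem, ⟨by omega, by omega, by omega, ?_⟩, o, ?_, (s, e), hmo,
        ?_, ?_, ?_, ?_⟩
      · simp only [Int.toNat_natCast]; exact_mod_cast hc
      · simpa only [Int.toNat_natCast] using hb
      · simp only [Int.toNat_natCast]
      · simp only [Int.toNat_natCast]
      · simp only [Int.toNat_natCast, pvZeroLen]; omega
      · simp only [Int.toNat_natCast]
        rw [pvZeroGet _ q s hs hq, List.length_replicate]
        omega

-- ===== VERDICT (by name: the statement is the Claim_ definition above) =====
theorem convert_map_to_space_matrix_spec : Claim_equal_convert_map_to_space_matrix := by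
  intro map_matrix path _
  unfold Spec_convert_map_to_space_matrix
  have hA : convert_map_to_space_matrix map_matrix path
      = (PySem.List.enumerate map_matrix 0).flatMap (fun rr =>
          [(pvRowF path rr.1 (PySem.List.enumerate rr.2.toList 0)).1,
           (pvRowF path rr.1 (PySem.List.enumerate rr.2.toList 0)).2.1,
           (pvRowF path rr.1 (PySem.List.enumerate rr.2.toList 0)).2.2]) := by
    unfold convert_map_to_space_matrix
    simpa using pvAeq path (PySem.List.enumerate map_matrix 0) []
  have hz : map_matrix.foldl
      (fun acc s => acc ++ [List.replicate (3*s.toList.length) (0:Int),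
                            List.replicate (3*s.toList.length) (0:Int),
                            List.replicate (3*s.toList.length) (0:Int)]) []
      = pvZero map_matrix := by
    rw [PySem.List.foldl_append_eq_flatMap]
    simp [pvZero]
  have hB : convert_map_to_space_matrix_alt map_matrix path
      = path.foldl (fun sp rc =>
      if (0:Int) ≤ rc.1 ∧ rc.1 < (map_matrix.length : Int) ∧ (0:Int) ≤ rc.2 ∧ rc.2 < ((map_matrix.getD rc.1.toNat "").toList.length : Int) then
        match pvBlocks? ((map_matrix.getD rc.1.toNat "").toList.getD rc.2.toNat ' ') with
        | some offs =>
            offs.foldl (fun sp de => pvSet1 sp (3*rc.1.toNat + de.1) (3*rc.2.toNat + de.2)) sp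
        | none => sp
      else sp) (pvZero map_matrix) := by
    unfold convert_map_to_space_matrix_alt
    rw [hz]
  obtain ⟨hBs, hB1, hB2⟩ := pvFoldPath map_matrix path (pvZero map_matrix)
  have hAshape : (convert_map_to_space_matrix map_matrix path).map List.length
      = (pvZero map_matrix).map List.length := by
    rw [hA, List.map_flatMap]
    have h1 : (fun rr : Int × String =>
        ([(pvRowF path rr.1 (PySem.List.enumerate rr.2.toList 0)).1,
          (pvRowF path rr.1 (PySem.List.enumerate rr.2.toList 0)).2.1,
          (pvRowF path rr.1 (PySem.List.enumerate rr.2.toList 0)).2.2].map List.length))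
        = fun rr : Int × String => [3*rr.2.toList.length, 3*rr.2.toList.length, 3*rr.2.toList.length] := by
      funext rr
      simp only [List.map_cons, List.map_nil]
      have hl : ∀ s, s < 3 → (pvPick s (pvRowF path rr.1 (PySem.List.enumerate rr.2.toList 0))).length
          = 3 * rr.2.toList.length := by
        intro s hs
        rw [pvPickRowF _ _ _ s hs,
          pvLenFlatMap3 _ _ (fun cx _ => pvLine_len path rr.1 cx s),
          PySem.List.length_enumerate]
      have e0 : (pvRowF path rr.1 (PySem.List.enumerate rr.2.toList 0)).1.length
          = 3 * rr.2.toList.length := hl 0 (by omega)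
      have e1 : (pvRowF path rr.1 (PySem.List.enumerate rr.2.toList 0)).2.1.length
          = 3 * rr.2.toList.length := hl 1 (by omega)
      have e2 : (pvRowF path rr.1 (PySem.List.enumerate rr.2.toList 0)).2.2.length
          = 3 * rr.2.toList.length := hl 2 (by omega)
      rw [e0, e1, e2]
    rw [h1, pvEnumFlatMap (fun s => [3*s.toList.length, 3*s.toList.length, 3*s.toList.length])
      map_matrix 0]
    unfold pvZero
    rw [List.map_flatMap]
    simp
  apply pvExt
  · rw [hAshape, hB]
    exact hBs.symm
  · intro i j
    rw [hA, pvAE, hB]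
    by_cases H : ∃ rc ∈ path, pvHitM map_matrix (pvZero map_matrix) rc i j
    · rw [hB1 i j H, if_pos ((pvKey map_matrix path i j).mp H)]
    · rw [hB2 i j H, pvZeroE, if_neg (fun hcond => H ((pvKey map_matrix path i j).mpr hcond))]
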